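-- pv_equiv track=rewrite | github.com/llhzm12128/llh-code-prediction-transformer | models/post_trav_trans/generate_ast_ids.py | get_type_ids
-- ===== SOURCE A (Python) =====
-- def get_type_ids(split_type, split_id):
--     ids = {
--         "call_ids": [],
--         "assign_ids": [],
--         "return_ids": [],
--         "list_ids": [],
--         "dict_ids": [],
--         "raise_ids": [],
--         ## New IDs from RQ3
--         "attribute_ids": [],
--         "cond_ids": [],
--         "comp_ids": [],
--         "tuple_ids": []
--     }
--     for i, flag in enumerate(split_id):
--         if flag == 1:
--             type_ = split_type[i]
--             if type_ == "Call":
--                 ids["call_ids"].append(i)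
--             elif type_ == "Assign":
--                 ids["assign_ids"].append(i)
--             elif type_ == "Return":
--                 ids["return_ids"].append(i)
--             elif type_ in {"ListComp", "ListLoad", "ListStore"}:
--                 ids["list_ids"].append(i)
--             elif type_ in {"DictComp", "DictLoad", "DictStore"}:
--                 ids["dict_ids"].append(i)
--             elif type_ == "Raise":
--                 ids["raise_ids"].append(i)
--             # RQ3 additional metrics
--             elif type_ in {"AttributeLoad", "AttributeStore"}:
--                 ids["attribute_ids"].append(i)
--             elif type_ in {"If", "orelse"}:
--                 ids["cond_ids"].append(i)
--             elif type_ in {"CompareEq", "CompareIn", "CompareIs"}: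
--                 ids["comp_ids"].append(i)
--             elif type_ in {"TupleDel", "TupleLoad", "TupleStore"}:
--                 ids["tuple_ids"].append(i)
--
--     return ids
-- ===== SOURCE B (Python) =====
-- _TABLE = {
--     "Call": "call_ids",
--     "Assign": "assign_ids",
--     "Return": "return_ids",
--     "ListComp": "list_ids", "ListLoad": "list_ids", "ListStore": "list_ids",
--     "DictComp": "dict_ids", "DictLoad": "dict_ids", "DictStore": "dict_ids",
--     "Raise": "raise_ids",
--     "AttributeLoad": "attribute_ids", "AttributeStore": "attribute_ids",
--     "If": "cond_ids", "orelse": "cond_ids",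
--     "CompareEq": "comp_ids", "CompareIn": "comp_ids", "CompareIs": "comp_ids",
--     "TupleDel": "tuple_ids", "TupleLoad": "tuple_ids", "TupleStore": "tuple_ids",
-- }
--
-- _KEYS = ["call_ids", "assign_ids", "return_ids", "list_ids", "dict_ids",
--          "raise_ids", "attribute_ids", "cond_ids", "comp_ids", "tuple_ids"]
--
--
-- def get_type_ids(split_type, split_id):
--     hot = [i for i, flag in enumerate(split_id) if flag == 1]
--     return {k: [i for i in hot if _TABLE.get(split_type[i]) == k] for k in _KEYS}
-- ===== Notes on version B (the rewrite author's own statement) =====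
-- stated objective: simpler
-- what changed: Replaces the nine-branch if/elif cascade with a declarative type->bucket dispatch table, first collecting the flagged indices and then building the result as a per-bucket dict comprehension that groups them by their table label.
import Mathlib
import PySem

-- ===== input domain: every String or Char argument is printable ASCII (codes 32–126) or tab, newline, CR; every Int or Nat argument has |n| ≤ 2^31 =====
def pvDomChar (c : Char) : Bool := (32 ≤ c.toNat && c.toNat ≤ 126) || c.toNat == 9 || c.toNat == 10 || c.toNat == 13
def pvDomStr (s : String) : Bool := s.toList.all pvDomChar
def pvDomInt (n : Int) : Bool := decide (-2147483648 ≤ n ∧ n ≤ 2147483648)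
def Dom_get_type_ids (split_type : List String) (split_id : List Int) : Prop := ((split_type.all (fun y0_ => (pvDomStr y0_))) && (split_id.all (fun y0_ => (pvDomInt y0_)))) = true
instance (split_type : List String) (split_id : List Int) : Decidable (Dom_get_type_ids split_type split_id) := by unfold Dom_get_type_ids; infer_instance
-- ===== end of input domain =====

-- B replaces A's nine-branch if/elif cascade by a dispatch table plus a per-bucket
-- grouping comprehension (objective: simpler). Return-value equivalence on Pre_.

-- ===== PORT A =====
def get_type_ids (split_type : List String) (split_id : List Int) : List (String × List Int) :=
  let ids : PySem.Dict String (List Int) := PySem.Dict.ofList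
    [("call_ids", []), ("assign_ids", []), ("return_ids", []), ("list_ids", []),
     ("dict_ids", []), ("raise_ids", []), ("attribute_ids", []), ("cond_ids", []),
     ("comp_ids", []), ("tuple_ids", [])]
  let ids := (PySem.List.enumerate split_id 0).foldl (fun d p =>
    if p.2 == 1 then
      match PySem.List.pyGet? split_type p.1 with
      | none => d   -- Python raises IndexError here; excluded by Pre_get_type_ids
      | some type_ =>
        if type_ == "Call" then d.modify "call_ids" [] (· ++ [p.1])
        else if type_ == "Assign" then d.modify "assign_ids" [] (· ++ [p.1])
        else if type_ == "Return" then d.modify "return_ids" [] (· ++ [p.1])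
        else if type_ == "ListComp" || type_ == "ListLoad" || type_ == "ListStore" then d.modify "list_ids" [] (· ++ [p.1])
        else if type_ == "DictComp" || type_ == "DictLoad" || type_ == "DictStore" then d.modify "dict_ids" [] (· ++ [p.1])
        else if type_ == "Raise" then d.modify "raise_ids" [] (· ++ [p.1])
        else if type_ == "AttributeLoad" || type_ == "AttributeStore" then d.modify "attribute_ids" [] (· ++ [p.1])
        else if type_ == "If" || type_ == "orelse" then d.modify "cond_ids" [] (· ++ [p.1])
        else if type_ == "CompareEq" || type_ == "CompareIn" || type_ == "CompareIs" then d.modify "comp_ids" [] (· ++ [p.1])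
        else if type_ == "TupleDel" || type_ == "TupleLoad" || type_ == "TupleStore" then d.modify "tuple_ids" [] (· ++ [p.1])
        else d
    else d) ids
  ids.items

-- ===== PORT B =====
def pvTable : PySem.Dict String String := PySem.Dict.ofList
  [("Call", "call_ids"), ("Assign", "assign_ids"), ("Return", "return_ids"),
   ("ListComp", "list_ids"), ("ListLoad", "list_ids"), ("ListStore", "list_ids"),
   ("DictComp", "dict_ids"), ("DictLoad", "dict_ids"), ("DictStore", "dict_ids"),
   ("Raise", "raise_ids"),
   ("AttributeLoad", "attribute_ids"), ("AttributeStore", "attribute_ids"),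
   ("If", "cond_ids"), ("orelse", "cond_ids"),
   ("CompareEq", "comp_ids"), ("CompareIn", "comp_ids"), ("CompareIs", "comp_ids"),
   ("TupleDel", "tuple_ids"), ("TupleLoad", "tuple_ids"), ("TupleStore", "tuple_ids")]

def pvKeys : List String :=
  ["call_ids", "assign_ids", "return_ids", "list_ids", "dict_ids",
   "raise_ids", "attribute_ids", "cond_ids", "comp_ids", "tuple_ids"]

def get_type_ids_alt (split_type : List String) (split_id : List Int) : List (String × List Int) :=
  let hot := ((PySem.List.enumerate split_id 0).filter (fun p => p.2 == 1)).map (·.1)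
  pvKeys.map (fun k => (k, hot.filter (fun i =>
    (match PySem.List.pyGet? split_type i with   -- split_type[i]: IndexError excluded by Pre_
     | some t => pvTable.get? t
     | none => none) == some k)))

-- ===== PRECONDITION & SPEC =====
-- Pre_ excludes exactly the inputs where A raises IndexError: a flagged position i
-- (split_id[i] == 1) with no corresponding entry in split_type.
def Pre_get_type_ids (split_type : List String) (split_id : List Int) : Prop :=
  ∀ p ∈ PySem.List.enumerate split_id 0, p.2 = 1 → p.1 < (split_type.length : Int)
instance (split_type : List String) (split_id : List Int) : Decidable (Pre_get_type_ids split_type split_id) := by unfold Pre_get_type_ids; infer_instance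
def pvWitness_get_type_ids : List String × List Int := (["Call", "Foo", "If"], [1, 1, 1])

def Spec_get_type_ids (split_type : List String) (split_id : List Int) (out : List (String × List Int)) : Prop := out = get_type_ids_alt split_type split_id
instance (split_type : List String) (split_id : List Int) (out : List (String × List Int)) : Decidable (Spec_get_type_ids split_type split_id out) := by unfold Spec_get_type_ids; infer_instance

-- ===== CLAIM (what is proved, stated in full; the proofs are below) =====
def Claim_equal_get_type_ids : Prop := ∀ (split_type : List String) (split_id : List Int), Dom_get_type_ids split_type split_id → Pre_get_type_ids split_type split_id → Spec_get_type_ids split_type split_id (get_type_ids split_type split_id)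

-- ===== LEMMAS AND PROOFS =====

-- A's cascade as a labelling function (proof helper; equals pvTable.get?).
def pvCasc (t : String) : Option String :=
  if t == "Call" then some "call_ids"
  else if t == "Assign" then some "assign_ids"
  else if t == "Return" then some "return_ids"
  else if t == "ListComp" || t == "ListLoad" || t == "ListStore" then some "list_ids"
  else if t == "DictComp" || t == "DictLoad" || t == "DictStore" then some "dict_ids"
  else if t == "Raise" then some "raise_ids"
  else if t == "AttributeLoad" || t == "AttributeStore" then some "attribute_ids"
  else if t == "If" || t == "orelse" then some "cond_ids"
  else if t == "CompareEq" || t == "CompareIn" || t == "CompareIs" then some "comp_ids"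
  else if t == "TupleDel" || t == "TupleLoad" || t == "TupleStore" then some "tuple_ids"
  else none

-- the labelling step of A's loop: which bucket (if any) index p.1 goes to
def pvLbl (st : List String) (p : Int × Int) : Option (String × Int) :=
  if p.2 == 1 then
    match PySem.List.pyGet? st p.1 with
    | none => none
    | some t => (pvCasc t).map (fun k => (k, p.1))
  else none

theorem pvCasc_eq_table (t : String) : pvCasc t = pvTable.get? t := by
  rw [show pvTable = PySem.Dict.mk
    [("Call", "call_ids"), ("Assign", "assign_ids"), ("Return", "return_ids"),
     ("ListComp", "list_ids"), ("ListLoad", "list_ids"), ("ListStore", "list_ids"),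
     ("DictComp", "dict_ids"), ("DictLoad", "dict_ids"), ("DictStore", "dict_ids"),
     ("Raise", "raise_ids"),
     ("AttributeLoad", "attribute_ids"), ("AttributeStore", "attribute_ids"),
     ("If", "cond_ids"), ("orelse", "cond_ids"),
     ("CompareEq", "comp_ids"), ("CompareIn", "comp_ids"), ("CompareIs", "comp_ids"),
     ("TupleDel", "tuple_ids"), ("TupleLoad", "tuple_ids"), ("TupleStore", "tuple_ids")] from by decide]
  unfold pvCasc
  simp only [PySem.Dict.get?_mk_cons]
  by_cases h0 : t = "Call"
  · simp [h0]
  by_cases h1 : t = "Assign"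
  · simp [h0, Ne.symm h0, h1]
  by_cases h2 : t = "Return"
  · simp [h0, Ne.symm h0, h1, Ne.symm h1, h2]
  by_cases h3 : t = "ListComp"
  · simp [h0, Ne.symm h0, h1, Ne.symm h1, h2, Ne.symm h2, h3]
  by_cases h4 : t = "ListLoad"
  · simp [h0, Ne.symm h0, h1, Ne.symm h1, h2, Ne.symm h2, h3, Ne.symm h3, h4]
  by_cases h5 : t = "ListStore"
  · simp [h0, Ne.symm h0, h1, Ne.symm h1, h2, Ne.symm h2, h3, Ne.symm h3, h4, Ne.symm h4, h5]
  by_cases h6 : t = "DictComp"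
  · simp [h0, Ne.symm h0, h1, Ne.symm h1, h2, Ne.symm h2, h3, Ne.symm h3, h4, Ne.symm h4, h5, Ne.symm h5, h6]
  by_cases h7 : t = "DictLoad"
  · simp [h0, Ne.symm h0, h1, Ne.symm h1, h2, Ne.symm h2, h3, Ne.symm h3, h4, Ne.symm h4, h5, Ne.symm h5, h6, Ne.symm h6, h7]
  by_cases h8 : t = "DictStore"
  · simp [h0, Ne.symm h0, h1, Ne.symm h1, h2, Ne.symm h2, h3, Ne.symm h3, h4, Ne.symm h4, h5, Ne.symm h5, h6, Ne.symm h6, h7, Ne.symm h7, h8]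
  by_cases h9 : t = "Raise"
  · simp [h0, Ne.symm h0, h1, Ne.symm h1, h2, Ne.symm h2, h3, Ne.symm h3, h4, Ne.symm h4, h5, Ne.symm h5, h6, Ne.symm h6, h7, Ne.symm h7, h8, Ne.symm h8, h9]
  by_cases h10 : t = "AttributeLoad"
  · simp [h0, Ne.symm h0, h1, Ne.symm h1, h2, Ne.symm h2, h3, Ne.symm h3, h4, Ne.symm h4, h5, Ne.symm h5, h6, Ne.symm h6, h7, Ne.symm h7, h8, Ne.symm h8, h9, Ne.symm h9, h10]
  by_cases h11 : t = "AttributeStore"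
  · simp [h0, Ne.symm h0, h1, Ne.symm h1, h2, Ne.symm h2, h3, Ne.symm h3, h4, Ne.symm h4, h5, Ne.symm h5, h6, Ne.symm h6, h7, Ne.symm h7, h8, Ne.symm h8, h9, Ne.symm h9, h10, Ne.symm h10, h11]
  by_cases h12 : t = "If"
  · simp [h0, Ne.symm h0, h1, Ne.symm h1, h2, Ne.symm h2, h3, Ne.symm h3, h4, Ne.symm h4, h5, Ne.symm h5, h6, Ne.symm h6, h7, Ne.symm h7, h8, Ne.symm h8, h9, Ne.symm h9, h10, Ne.symm h10, h11, Ne.symm h11, h12]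
  by_cases h13 : t = "orelse"
  · simp [h0, Ne.symm h0, h1, Ne.symm h1, h2, Ne.symm h2, h3, Ne.symm h3, h4, Ne.symm h4, h5, Ne.symm h5, h6, Ne.symm h6, h7, Ne.symm h7, h8, Ne.symm h8, h9, Ne.symm h9, h10, Ne.symm h10, h11, Ne.symm h11, h12, Ne.symm h12, h13]
  by_cases h14 : t = "CompareEq"
  · simp [h0, Ne.symm h0, h1, Ne.symm h1, h2, Ne.symm h2, h3, Ne.symm h3, h4, Ne.symm h4, h5, Ne.symm h5, h6, Ne.symm h6, h7, Ne.symm h7, h8, Ne.symm h8, h9, Ne.symm h9, h10, Ne.symm h10, h11, Ne.symm h11, h12, Ne.symm h12, h13, Ne.symm h13, h14]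
  by_cases h15 : t = "CompareIn"
  · simp [h0, Ne.symm h0, h1, Ne.symm h1, h2, Ne.symm h2, h3, Ne.symm h3, h4, Ne.symm h4, h5, Ne.symm h5, h6, Ne.symm h6, h7, Ne.symm h7, h8, Ne.symm h8, h9, Ne.symm h9, h10, Ne.symm h10, h11, Ne.symm h11, h12, Ne.symm h12, h13, Ne.symm h13, h14, Ne.symm h14, h15]
  by_cases h16 : t = "CompareIs"
  · simp [h0, Ne.symm h0, h1, Ne.symm h1, h2, Ne.symm h2, h3, Ne.symm h3, h4, Ne.symm h4, h5, Ne.symm h5, h6, Ne.symm h6, h7, Ne.symm h7, h8, Ne.symm h8, h9, Ne.symm h9, h10, Ne.symm h10, h11, Ne.symm h11, h12, Ne.symm h12, h13, Ne.symm h13, h14, Ne.symm h14, h15, Ne.symm h15, h16]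
  by_cases h17 : t = "TupleDel"
  · simp [h0, Ne.symm h0, h1, Ne.symm h1, h2, Ne.symm h2, h3, Ne.symm h3, h4, Ne.symm h4, h5, Ne.symm h5, h6, Ne.symm h6, h7, Ne.symm h7, h8, Ne.symm h8, h9, Ne.symm h9, h10, Ne.symm h10, h11, Ne.symm h11, h12, Ne.symm h12, h13, Ne.symm h13, h14, Ne.symm h14, h15, Ne.symm h15, h16, Ne.symm h16, h17]
  by_cases h18 : t = "TupleLoad"
  · simp [h0, Ne.symm h0, h1, Ne.symm h1, h2, Ne.symm h2, h3, Ne.symm h3, h4, Ne.symm h4, h5, Ne.symm h5, h6, Ne.symm h6, h7, Ne.symm h7, h8, Ne.symm h8, h9, Ne.symm h9, h10, Ne.symm h10, h11, Ne.symm h11, h12, Ne.symm h12, h13, Ne.symm h13, h14, Ne.symm h14, h15, Ne.symm h15, h16, Ne.symm h16, h17, Ne.symm h17, h18]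
  by_cases h19 : t = "TupleStore"
  · simp [h0, Ne.symm h0, h1, Ne.symm h1, h2, Ne.symm h2, h3, Ne.symm h3, h4, Ne.symm h4, h5, Ne.symm h5, h6, Ne.symm h6, h7, Ne.symm h7, h8, Ne.symm h8, h9, Ne.symm h9, h10, Ne.symm h10, h11, Ne.symm h11, h12, Ne.symm h12, h13, Ne.symm h13, h14, Ne.symm h14, h15, Ne.symm h15, h16, Ne.symm h16, h17, Ne.symm h17, h18, Ne.symm h18, h19]
  simp [h0, Ne.symm h0, h1, Ne.symm h1, h2, Ne.symm h2, h3, Ne.symm h3, h4, Ne.symm h4, h5, Ne.symm h5, h6, Ne.symm h6, h7, Ne.symm h7, h8, Ne.symm h8, h9, Ne.symm h9, h10, Ne.symm h10, h11, Ne.symm h11, h12, Ne.symm h12, h13, Ne.symm h13, h14, Ne.symm h14, h15, Ne.symm h15, h16, Ne.symm h16, h17, Ne.symm h17, h18, Ne.symm h18, h19, Ne.symm h19, PySem.Dict.get?]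

theorem pvCasc_mem (t : String) (k : String) (h : pvCasc t = some k) : k ∈ pvKeys := by
  unfold pvCasc at h
  unfold pvKeys
  split_ifs at h <;> simp_all

-- A's conditional loop body is the uniform 'modify at the label' step
set_option maxHeartbeats 1000000 in
theorem pvStepA_eq (st : List String) (d : PySem.Dict String (List Int)) (p : Int × Int) :
    (if p.2 == 1 then
      match PySem.List.pyGet? st p.1 with
      | none => d
      | some type_ =>
        if type_ == "Call" then d.modify "call_ids" [] (· ++ [p.1])
        else if type_ == "Assign" then d.modify "assign_ids" [] (· ++ [p.1])
        else if type_ == "Return" then d.modify "return_ids" [] (· ++ [p.1])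
        else if type_ == "ListComp" || type_ == "ListLoad" || type_ == "ListStore" then d.modify "list_ids" [] (· ++ [p.1])
        else if type_ == "DictComp" || type_ == "DictLoad" || type_ == "DictStore" then d.modify "dict_ids" [] (· ++ [p.1])
        else if type_ == "Raise" then d.modify "raise_ids" [] (· ++ [p.1])
        else if type_ == "AttributeLoad" || type_ == "AttributeStore" then d.modify "attribute_ids" [] (· ++ [p.1])
        else if type_ == "If" || type_ == "orelse" then d.modify "cond_ids" [] (· ++ [p.1])
        else if type_ == "CompareEq" || type_ == "CompareIn" || type_ == "CompareIs" then d.modify "comp_ids" [] (· ++ [p.1])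
        else if type_ == "TupleDel" || type_ == "TupleLoad" || type_ == "TupleStore" then d.modify "tuple_ids" [] (· ++ [p.1])
        else d
    else d)
    = (pvLbl st p).elim d (fun q => d.modify q.1 [] (· ++ [q.2])) := by
  unfold pvLbl pvCasc
  cases hb : (p.2 == 1) <;> simp only [hb, Bool.false_eq_true, if_false, if_true]
  · rfl
  · cases PySem.List.pyGet? st p.1 with
    | none => rfl
    | some t =>
      dsimp only
      split_ifs <;> rfl

-- bridge: A's grouped-by-label indices for bucket k are B's filtered hot indices
theorem pvBridge (st : List String) (k : String) (L : List (Int × Int)) :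
    (((L.filterMap (pvLbl st)).filter (fun q => q.1 == k)).map (·.2))
      = ((L.filter (fun p => p.2 == 1)).map (·.1)).filter (fun i =>
          (match PySem.List.pyGet? st i with
           | some t => pvTable.get? t
           | none => none) == some k) := by
  simp only [← pvCasc_eq_table]
  induction L with
  | nil => rfl
  | cons x xs ih =>
    cases hb : (x.2 == 1) with
    | false =>
      have hl : pvLbl st x = none := by simp [pvLbl, hb]
      simp only [List.filterMap_cons, List.filter_cons, hl, hb, Bool.false_eq_true, if_false]
      exact ih
    | true =>
      simp only [List.filterMap_cons, List.filter_cons, hb, if_true, List.map_cons]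
      cases hg : PySem.List.pyGet? st x.1 with
      | none =>
        have hl : pvLbl st x = none := by simp [pvLbl, hb, hg]
        simp only [hl]
        simpa using ih
      | some t =>
        have hl : pvLbl st x = (pvCasc t).map (fun k => (k, x.1)) := by
          simp [pvLbl, hb, hg]
        rw [hl]
        dsimp only
        split_ifs with hcnd
        · have hck : pvCasc t = some k := by simpa using hcnd
          rw [hck]
          simpa using ih
        · cases hc : pvCasc t with
          | none => simpa using ih
          | some k0 =>
            rw [hc] at hcnd
            have hk : (k0 == k) = false := by simpa using hcnd
            simp [hk, ih]

-- label of a labelled pair is one of the ten bucket keys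
theorem pvLbl_mem (st : List String) (p : Int × Int) (q : String × Int)
    (h : pvLbl st p = some q) : q.1 ∈ pvKeys := by
  unfold pvLbl at h
  by_cases hb : (p.2 == 1) = true
  · rw [if_pos hb] at h
    cases hg : PySem.List.pyGet? st p.1 with
    | none => rw [hg] at h; cases h
    | some t =>
      rw [hg] at h
      dsimp only at h
      cases hc : pvCasc t with
      | none => rw [hc] at h; cases h
      | some k0 =>
        rw [hc] at h
        have h2 : some (k0, p.1) = some q := by simpa using h
        obtain rfl := Option.some.inj h2
        exact pvCasc_mem t k0 hc
  · rw [if_neg hb] at h; cases h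

-- updating a set with elements it already contains changes nothing
theorem pvSet_update_self (s : List String) (xs : List String)
    (h : ∀ x ∈ xs, x ∈ s) : PySem.Set.update s xs = s := by
  rw [PySem.Set.update_eq_append_filter]
  have hnil : ((PySem.Set.ofList xs).filter fun y => !PySem.Set.contains s y) = [] := by
    apply List.filter_eq_nil_iff.mpr
    intro y hy
    have hys : y ∈ s := h y ((PySem.Set.mem_ofList xs y).mp hy)
    simp [(PySem.Set.contains_iff s y).mpr hys, hys]
  rw [hnil, List.append_nil]

-- A's conditional loop is the uniform modify loop over the labelled pairs
theorem pvFoldl_matchD (st : List String) (L : List (Int × Int))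
    (d : PySem.Dict String (List Int)) :
    L.foldl (fun d p => (pvLbl st p).elim d (fun q => d.modify q.1 [] (· ++ [q.2]))) d
      = (L.filterMap (pvLbl st)).foldl (fun d q => d.modify q.1 [] (· ++ [q.2])) d := by
  induction L generalizing d with
  | nil => rfl
  | cons x xs ih =>
    simp only [List.foldl_cons, List.filterMap_cons]
    cases hx : pvLbl st x <;> simp [hx, ih]

-- ===== VERDICT (by name: the statement is the Claim_ definition above) =====
theorem get_type_ids_spec : Claim_equal_get_type_ids := by
  intro st sid _hdom hpre
  unfold Spec_get_type_ids get_type_ids get_type_ids_alt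
  rw [show (fun (d : PySem.Dict String (List Int)) (p : Int × Int) =>
        (if p.2 == 1 then
          match PySem.List.pyGet? st p.1 with
          | none => d
          | some type_ =>
            if type_ == "Call" then d.modify "call_ids" [] (· ++ [p.1])
            else if type_ == "Assign" then d.modify "assign_ids" [] (· ++ [p.1])
            else if type_ == "Return" then d.modify "return_ids" [] (· ++ [p.1])
            else if type_ == "ListComp" || type_ == "ListLoad" || type_ == "ListStore" then d.modify "list_ids" [] (· ++ [p.1])
            else if type_ == "DictComp" || type_ == "DictLoad" || type_ == "DictStore" then d.modify "dict_ids" [] (· ++ [p.1])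
            else if type_ == "Raise" then d.modify "raise_ids" [] (· ++ [p.1])
            else if type_ == "AttributeLoad" || type_ == "AttributeStore" then d.modify "attribute_ids" [] (· ++ [p.1])
            else if type_ == "If" || type_ == "orelse" then d.modify "cond_ids" [] (· ++ [p.1])
            else if type_ == "CompareEq" || type_ == "CompareIn" || type_ == "CompareIs" then d.modify "comp_ids" [] (· ++ [p.1])
            else if type_ == "TupleDel" || type_ == "TupleLoad" || type_ == "TupleStore" then d.modify "tuple_ids" [] (· ++ [p.1])
            else d
        else d))
      = (fun d p => (pvLbl st p).elim d (fun q => d.modify q.1 [] (· ++ [q.2])))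
      from funext fun d => funext fun p => pvStepA_eq st d p]
  dsimp only
  rw [pvFoldl_matchD st]
  have hkeys : ((List.filterMap (pvLbl st) (PySem.List.enumerate sid)).foldl
      (fun d q => d.modify q.1 [] (· ++ [q.2]))
      (PySem.Dict.ofList
        [("call_ids", []), ("assign_ids", []), ("return_ids", []), ("list_ids", []),
         ("dict_ids", []), ("raise_ids", []), ("attribute_ids", []), ("cond_ids", []),
         ("comp_ids", []), ("tuple_ids", [])])).keys = pvKeys := by
    rw [PySem.Dict.keys_foldl_modify_key (List.filterMap (pvLbl st) (PySem.List.enumerate sid))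
      (fun q => q.1) [] (fun _ q => (· ++ [q.2]))]
    rw [show (PySem.Dict.ofList
        [("call_ids", ([] : List Int)), ("assign_ids", []), ("return_ids", []), ("list_ids", []),
         ("dict_ids", []), ("raise_ids", []), ("attribute_ids", []), ("cond_ids", []),
         ("comp_ids", []), ("tuple_ids", [])]).keys = pvKeys from by decide]
    apply pvSet_update_self
    intro x hx
    rcases List.mem_map.mp hx with ⟨q, hq, rfl⟩
    rcases List.mem_filterMap.mp hq with ⟨p, _, hpq⟩
    exact pvLbl_mem st p q hpq
  have hnd : ((List.filterMap (pvLbl st) (PySem.List.enumerate sid)).foldl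
      (fun d q => d.modify q.1 [] (· ++ [q.2]))
      (PySem.Dict.ofList
        [("call_ids", []), ("assign_ids", []), ("return_ids", []), ("list_ids", []),
         ("dict_ids", []), ("raise_ids", []), ("attribute_ids", []), ("cond_ids", []),
         ("comp_ids", []), ("tuple_ids", [])])).keys.Nodup := by
    rw [hkeys]; decide
  rw [PySem.Dict.items_eq_map_keys _ hnd [], hkeys]
  apply List.map_congr_left
  intro k hkmem
  rw [PySem.Dict.getD_foldl_modify_append (List.filterMap (pvLbl st) (PySem.List.enumerate sid)) _ k]
  have h0 : (PySem.Dict.ofList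
        [("call_ids", ([] : List Int)), ("assign_ids", []), ("return_ids", []), ("list_ids", []),
         ("dict_ids", []), ("raise_ids", []), ("attribute_ids", []), ("cond_ids", []),
         ("comp_ids", []), ("tuple_ids", [])]).getD k [] = [] := by
    fin_cases hkmem <;> decide
  rw [h0, List.nil_append, pvBridge st k]
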